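-- pv_equiv track=rewrite | github.com/Silverbullet-idea/full-hangar | scraper/config.py | get_makes_for_tiers
-- ===== SOURCE A (Python) =====
-- from typing import Iterable, Optional
--
-- _TIER_1_MAKES = [
--     "Cessna",
--     "Piper",
--     "Beechcraft",
--     "Cirrus",
--     "Mooney",
--     "Diamond",
-- ]
--
-- _TIER_2_MAKES = [
--     "Commander",
--     "Grumman",
--     "Maule",
--     "Bellanca",
--     "Luscombe",
--     "Taylorcraft",
--     "Aeronca",
--     "Stinson",
--     "Robin",
--     "Socata",
-- ]
--
-- _TIER_3_MAKES = [
--     "King Air",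
--     "TBM",
--     "PC-12",
--     "Citation",
--     "Learjet",
--     "Falcon",
--     "Gulfstream",
--     "Hawker",
--     "Embraer",
--     "Bell",
--     "Robinson",
--     "Sikorsky",
--     "Eurocopter",
-- ]
--
-- _ALL_MAKES = _TIER_1_MAKES + _TIER_2_MAKES + _TIER_3_MAKES
--
-- def get_makes_for_tiers(tiers: Iterable[str] | None) -> list[str]:
--     requested = {str(t).strip().lower() for t in (tiers or []) if str(t).strip()}
--     if not requested or "all" in requested:
--         return list(_ALL_MAKES)
--
--     makes: list[str] = []
--     if "1" in requested:
--         makes.extend(_TIER_1_MAKES)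
--     if "2" in requested:
--         makes.extend(_TIER_2_MAKES)
--     if "3" in requested:
--         makes.extend(_TIER_3_MAKES)
--     # Preserve order while de-duping.
--     return list(dict.fromkeys(makes))
-- ===== SOURCE B (Python) =====
-- _TIER_1_MAKES = [
--     "Cessna",
--     "Piper",
--     "Beechcraft",
--     "Cirrus",
--     "Mooney",
--     "Diamond",
-- ]
--
-- _TIER_2_MAKES = [
--     "Commander",
--     "Grumman",
--     "Maule",
--     "Bellanca",
--     "Luscombe",
--     "Taylorcraft",
--     "Aeronca",
--     "Stinson",
--     "Robin",
--     "Socata",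
-- ]
--
-- _TIER_3_MAKES = [
--     "King Air",
--     "TBM",
--     "PC-12",
--     "Citation",
--     "Learjet",
--     "Falcon",
--     "Gulfstream",
--     "Hawker",
--     "Embraer",
--     "Bell",
--     "Robinson",
--     "Sikorsky",
--     "Eurocopter",
-- ]
--
-- _ALL_MAKES = _TIER_1_MAKES + _TIER_2_MAKES + _TIER_3_MAKES
--
-- # make -> tier key, built once
-- _TIER_OF = {
--     m: key
--     for key, lst in (("1", _TIER_1_MAKES), ("2", _TIER_2_MAKES), ("3", _TIER_3_MAKES))
--     for m in lst
-- }
--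
-- def get_makes_for_tiers(tiers):
--     requested = {str(t).strip().lower() for t in (tiers or []) if str(t).strip()}
--     if not requested or "all" in requested:
--         return list(_ALL_MAKES)
--     # single ordered pass over the full list: keep makes whose tier was requested
--     return [m for m in _ALL_MAKES if _TIER_OF.get(m, "") in requested]
-- ===== Notes on version B (the rewrite author's own statement) =====
-- stated objective: alternative
-- what changed: Instead of conditionally extending per-tier lists and de-duplicating, B builds a make-to-tier-key map once and produces the result with a single ordered filter pass over _ALL_MAKES, with the dedup step dropped.
import Mathlib
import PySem

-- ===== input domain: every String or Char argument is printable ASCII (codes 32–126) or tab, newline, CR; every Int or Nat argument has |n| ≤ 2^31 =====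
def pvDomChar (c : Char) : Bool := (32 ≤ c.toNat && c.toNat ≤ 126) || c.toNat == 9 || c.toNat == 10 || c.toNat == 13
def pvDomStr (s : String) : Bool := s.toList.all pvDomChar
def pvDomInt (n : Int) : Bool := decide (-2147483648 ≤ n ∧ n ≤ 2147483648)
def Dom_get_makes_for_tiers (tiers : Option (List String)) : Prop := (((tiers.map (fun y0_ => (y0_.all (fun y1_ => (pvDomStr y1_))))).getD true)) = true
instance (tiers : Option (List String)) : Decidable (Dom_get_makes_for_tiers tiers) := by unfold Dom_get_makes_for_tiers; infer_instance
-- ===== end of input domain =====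

-- B replaces A's per-tier extend + de-dup with a single ordered filter of the full make list via a make→tier map (alternative decomposition).


-- ===== PORT A =====
def pvTier1 : List String :=
  ["Cessna", "Piper", "Beechcraft", "Cirrus", "Mooney", "Diamond"]
def pvTier2 : List String :=
  ["Commander", "Grumman", "Maule", "Bellanca", "Luscombe", "Taylorcraft",
   "Aeronca", "Stinson", "Robin", "Socata"]
def pvTier3 : List String :=
  ["King Air", "TBM", "PC-12", "Citation", "Learjet", "Falcon", "Gulfstream",
   "Hawker", "Embraer", "Bell", "Robinson", "Sikorsky", "Eurocopter"]
def pvAllMakes : List String := pvTier1 ++ pvTier2 ++ pvTier3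

def get_makes_for_tiers (tiers : Option (List String)) : List String :=
  -- set comprehension: {str(t).strip().lower() for t in (tiers or []) if str(t).strip()}
  let requested : PySem.Set String :=
    (tiers.getD []).foldl (fun s t =>
      let st := PySem.Str.strip t
      if st ≠ "" then PySem.Set.add s (PySem.Str.lower st) else s) PySem.Set.empty
  if requested.isEmpty || PySem.Set.contains requested "all" then pvAllMakes
  else
    let makes : List String := []
    let makes := if PySem.Set.contains requested "1" then makes ++ pvTier1 else makes
    let makes := if PySem.Set.contains requested "2" then makes ++ pvTier2 else makes
    let makes := if PySem.Set.contains requested "3" then makes ++ pvTier3 else makes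
    PySem.List.dedup makes

-- ===== PORT B =====
-- _TIER_OF: make -> tier key, built once
def pvTierOf : PySem.Dict String String :=
  PySem.Dict.ofList (pvTier1.map (fun m => (m, "1")) ++ pvTier2.map (fun m => (m, "2"))
    ++ pvTier3.map (fun m => (m, "3")))

def get_makes_for_tiers_alt (tiers : Option (List String)) : List String :=
  let requested : PySem.Set String :=
    (tiers.getD []).foldl (fun s t =>
      let st := PySem.Str.strip t
      if st ≠ "" then PySem.Set.add s (PySem.Str.lower st) else s) PySem.Set.empty
  if requested.isEmpty || PySem.Set.contains requested "all" then pvAllMakes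
  else pvAllMakes.filter (fun m => PySem.Set.contains requested (PySem.Dict.getD pvTierOf m ""))

-- ===== PRECONDITION & SPEC =====
def Spec_get_makes_for_tiers (tiers : Option (List String)) (out : List String) : Prop := out = get_makes_for_tiers_alt tiers
instance (tiers : Option (List String)) (out : List String) : Decidable (Spec_get_makes_for_tiers tiers out) := by unfold Spec_get_makes_for_tiers; infer_instance

-- ===== CLAIM (what is proved, stated in full; the proofs are below) =====
def Claim_equal_get_makes_for_tiers : Prop := ∀ (tiers : Option (List String)), Dom_get_makes_for_tiers tiers → Spec_get_makes_for_tiers tiers (get_makes_for_tiers tiers)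

-- ===== LEMMAS AND PROOFS =====

-- the core fact: for ANY requested set r, A's conditional-extend-then-dedup equals B's filter of the full list
theorem pv_core (r : PySem.Set String) :
    PySem.List.dedup
      (let makes : List String := []
       let makes := if PySem.Set.contains r "1" then makes ++ pvTier1 else makes
       let makes := if PySem.Set.contains r "2" then makes ++ pvTier2 else makes
       if PySem.Set.contains r "3" then makes ++ pvTier3 else makes)
    = pvAllMakes.filter (fun m => PySem.Set.contains r (PySem.Dict.getD pvTierOf m "")) := by
  have h1 : ∀ m ∈ pvTier1, PySem.Dict.getD pvTierOf m "" = "1" := by decide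
  have h2 : ∀ m ∈ pvTier2, PySem.Dict.getD pvTierOf m "" = "2" := by decide
  have h3 : ∀ m ∈ pvTier3, PySem.Dict.getD pvTierOf m "" = "3" := by decide
  have e1 : pvTier1.filter (fun m => PySem.Set.contains r (PySem.Dict.getD pvTierOf m "")) =
      pvTier1.filter (fun _ => PySem.Set.contains r "1") :=
    List.filter_congr (fun m hm => by rw [h1 m hm])
  have e2 : pvTier2.filter (fun m => PySem.Set.contains r (PySem.Dict.getD pvTierOf m "")) =
      pvTier2.filter (fun _ => PySem.Set.contains r "2") :=
    List.filter_congr (fun m hm => by rw [h2 m hm])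
  have e3 : pvTier3.filter (fun m => PySem.Set.contains r (PySem.Dict.getD pvTierOf m "")) =
      pvTier3.filter (fun _ => PySem.Set.contains r "3") :=
    List.filter_congr (fun m hm => by rw [h3 m hm])
  rw [show pvAllMakes = pvTier1 ++ pvTier2 ++ pvTier3 from rfl, List.filter_append,
      List.filter_append, e1, e2, e3]
  cases c1 : PySem.Set.contains r "1" <;> cases c2 : PySem.Set.contains r "2" <;>
    cases c3 : PySem.Set.contains r "3" <;> decide

-- ===== VERDICT (by name: the statement is the Claim_ definition above) =====
theorem get_makes_for_tiers_spec : Claim_equal_get_makes_for_tiers := by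
  intro tiers _
  unfold Spec_get_makes_for_tiers get_makes_for_tiers get_makes_for_tiers_alt
  generalize ((tiers.getD []).foldl (fun s t =>
      let st := PySem.Str.strip t
      if st ≠ "" then PySem.Set.add s (PySem.Str.lower st) else s) PySem.Set.empty
      : PySem.Set String) = r
  by_cases h : (r.isEmpty || PySem.Set.contains r "all") = true
  · simp only [h, if_true]
  · simp only [Bool.not_eq_true] at h
    simp only [h, Bool.false_eq_true, if_false]
    exact pv_core r
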